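-- pv_equiv track=rewrite | github.com/matejostadal/use_of_prime_numbers | impl/primality_testing.py | find_mersenne_exponent
-- ===== SOURCE A (Python) =====
-- def find_mersenne_exponent(n):
--     """
--     Finds an exponent s (if it exsists), for which 2^s - 1 = n.
--
--     Args:
--         n (int): Number for which we attempt to find the exponent.
--
--     Returns:
--         int: Exponent s for which 2^s - 1 = n. (None if such exponent does not exist.)
--     """
--     total = n + 1
--     exponent = 0
--
--     # dividing by 2 if possible
--     while total > 0 and is_even(total):
--         exponent += 1
--         total //= 2
--
--     if total == 1:
--         return exponent
--
--     return None
--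
-- def is_divisible(a, b):
--     """Tests whether b divides a."""
--     return a % b == 0
--
-- def is_even(a):
--     """Tests whether a is even."""
--     return is_divisible(a, 2)
-- ===== SOURCE B (Python) =====
-- def find_mersenne_exponent(n):
--     total = n + 1
--     if total > 0 and total & (total - 1) == 0:
--         return total.bit_length() - 1
--     return None
-- ===== Notes on version B (the rewrite author's own statement) =====
-- stated objective: idiomatic
-- what changed: Replaced the halve-while-even loop with a closed-form power-of-two bit test on total (AND of total with its predecessor) and bit_length for the exponent.
import Mathlib
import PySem

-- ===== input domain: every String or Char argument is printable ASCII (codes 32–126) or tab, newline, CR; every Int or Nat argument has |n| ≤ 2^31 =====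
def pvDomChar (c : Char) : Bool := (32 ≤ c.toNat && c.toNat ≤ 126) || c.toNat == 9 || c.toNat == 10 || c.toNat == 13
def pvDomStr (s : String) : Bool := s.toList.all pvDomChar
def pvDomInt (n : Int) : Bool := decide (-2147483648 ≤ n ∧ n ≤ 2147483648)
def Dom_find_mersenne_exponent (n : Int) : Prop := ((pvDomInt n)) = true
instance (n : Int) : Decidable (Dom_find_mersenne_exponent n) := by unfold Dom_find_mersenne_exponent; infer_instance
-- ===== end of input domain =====

-- B replaces A's halve-while-even loop by a closed-form power-of-two bit test
-- (AND of total with its predecessor) plus bit_length (objective: idiomatic).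

-- ===== PORT A =====
def is_divisible (a b : Int) : Bool := PySem.Int.mod a b == 0

def is_even (a : Int) : Bool := is_divisible a 2

-- the 'while total > 0 and is_even(total)' loop; state = (total, exponent)
def mersenneLoop (total exponent : Int) : Int × Int :=
  if h : total > 0 ∧ is_even total = true then
    mersenneLoop (PySem.Int.floordiv total 2) (exponent + 1)
  else
    (total, exponent)
termination_by total.toNat
decreasing_by
  have h2 : PySem.Int.floordiv total 2 = total / 2 :=
    PySem.Int.floordiv_eq_ediv_of_pos (by omega)
  rw [h2]; omega

def find_mersenne_exponent (n : Int) : Option Int :=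
  if (mersenneLoop (n + 1) 0).1 = 1 then some (mersenneLoop (n + 1) 0).2 else none

-- ===== PORT B =====
def find_mersenne_exponent_alt (n : Int) : Option Int :=
  if n + 1 > 0 ∧ PySem.Int.band (n + 1) (n + 1 - 1) = 0 then
    some ((PySem.Int.bitLength (n + 1) : Int) - 1)   -- total.bit_length() - 1
  else
    none

-- ===== PRECONDITION & SPEC =====
def Spec_find_mersenne_exponent (n : Int) (out : Option Int) : Prop := out = find_mersenne_exponent_alt n
instance (n : Int) (out : Option Int) : Decidable (Spec_find_mersenne_exponent n out) := by unfold Spec_find_mersenne_exponent; infer_instance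

-- ===== CLAIM (what is proved, stated in full; the proofs are below) =====
def Claim_equal_find_mersenne_exponent : Prop := ∀ (n : Int), Dom_find_mersenne_exponent n → Spec_find_mersenne_exponent n (find_mersenne_exponent n)

-- ===== LEMMAS AND PROOFS =====

theorem land_two_mul_pred (q : Nat) (hq : 0 < q) :
    (2 * q) &&& (2 * q - 1) = 2 * (q &&& (q - 1)) := by
  have h2 : 2 * q - 1 = Nat.bit true (q - 1) := by rw [Nat.bit_true_apply]; omega
  have h1 : 2 * q = Nat.bit false q := by rw [Nat.bit_false_apply]
  rw [h2, h1, Nat.land_bit]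
  simp [Nat.bit_false_apply]

theorem land_odd_pred (q : Nat) : (2 * q + 1) &&& (2 * q) = 2 * q := by
  have h1 : 2 * q + 1 = Nat.bit true q := by rw [Nat.bit_true_apply]
  have h2 : 2 * q = Nat.bit false q := by rw [Nat.bit_false_apply]
  rw [h1, h2, Nat.land_bit]
  simp [Nat.bit_false_apply]

theorem mersenneLoop_step_even (m : Nat) (e : Int) (hm : 0 < m) (hev : m % 2 = 0) :
    mersenneLoop (m : Int) e = mersenneLoop ((m / 2 : Nat) : Int) (e + 1) := by
  rw [mersenneLoop]
  have hdvd : (2 : Int) ∣ (m : Int) := by exact_mod_cast Nat.dvd_of_mod_eq_zero hev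
  have hc : ((m : Int) > 0 ∧ is_even (m : Int) = true) := by
    refine ⟨by exact_mod_cast hm, ?_⟩
    simp [is_even, is_divisible, hdvd]
  rw [dif_pos hc]
  have heq : PySem.Int.floordiv (m : Int) 2 = ((m / 2 : Nat) : Int) := by
    exact_mod_cast PySem.Int.floordiv_natCast m 2
  rw [heq]

theorem mersenneLoop_stop_odd (m : Nat) (e : Int) (hodd : m % 2 = 1) :
    mersenneLoop (m : Int) e = ((m : Int), e) := by
  rw [mersenneLoop]
  have : ¬ ((m : Int) > 0 ∧ is_even (m : Int) = true) := by
    rintro ⟨-, hev⟩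
    simp [is_even, is_divisible] at hev
    have : (2 : Nat) ∣ m := by exact_mod_cast hev
    omega
  rw [dif_neg this]

theorem mersenneLoop_main (m : Nat) : ∀ (e : Int), 0 < m →
    (if (mersenneLoop (m : Int) e).1 = 1 then some (mersenneLoop (m : Int) e).2 else none)
      = if m &&& (m - 1) = 0 then some (e + ((PySem.Int.bitLength (m : Int) : Int) - 1)) else none := by
  induction m using Nat.strong_induction_on with
  | _ m ih =>
    intro e hm
    rcases Nat.even_or_odd m with hev | hodd
    · -- m even, m > 0: one loop iteration, then the induction hypothesis at m / 2
      have hev' : m % 2 = 0 := Nat.even_iff.mp hev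
      have hq : 0 < m / 2 := by omega
      have hm2 : m = 2 * (m / 2) := by omega
      rw [mersenneLoop_step_even m e hm hev', ih (m / 2) (by omega) (e + 1) hq]
      have hland : m &&& (m - 1) = 2 * ((m / 2) &&& (m / 2 - 1)) := by
        conv_lhs => rw [hm2]
        exact land_two_mul_pred (m / 2) hq
      have hbl : PySem.Int.bitLength (m : Int) = PySem.Int.bitLength ((m / 2 : Nat) : Int) + 1 :=
        PySem.Int.bitLength_natCast hm
      rw [hland, hbl]
      by_cases h0 : (m / 2) &&& (m / 2 - 1) = 0
      · rw [if_pos h0, if_pos (by omega)]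
        congr 1
        push_cast
        ring
      · rw [if_neg h0, if_neg (by omega)]
    · -- m odd: the loop stops immediately
      have hodd' : m % 2 = 1 := Nat.odd_iff.mp hodd
      rw [mersenneLoop_stop_odd m e hodd']
      rcases Nat.lt_or_ge m 2 with h1 | h2
      · -- m = 1: both sides are some e
        have : m = 1 := by omega
        subst this
        norm_num
        decide
      · -- m odd, m > 1: total = m ≠ 1 on the left, m &&& (m-1) = m - 1 ≠ 0 on the right
        have hm2 : m = 2 * (m / 2) + 1 := by omega
        have hland : m &&& (m - 1) = 2 * (m / 2) := by
          conv_lhs => rw [hm2]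
          have h3 : 2 * (m / 2) + 1 - 1 = 2 * (m / 2) := by omega
          rw [h3]
          exact land_odd_pred (m / 2)
        rw [if_neg (by simp; omega), if_neg (by omega)]

theorem find_mersenne_exponent_eq (n : Int) :
    find_mersenne_exponent n = find_mersenne_exponent_alt n := by
  unfold find_mersenne_exponent find_mersenne_exponent_alt
  by_cases hp : n + 1 > 0
  · -- total > 0: write total as a Nat cast and use the loop lemma
    obtain ⟨m, hmt⟩ : ∃ m : Nat, n + 1 = (m : Int) := ⟨(n + 1).toNat, by omega⟩
    have hm : 0 < m := by omega
    rw [hmt]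
    have hsub : (m : Int) - 1 = ((m - 1 : Nat) : Int) := by omega
    rw [hsub, PySem.Int.band_natCast, mersenneLoop_main m 0 hm]
    by_cases h0 : m &&& (m - 1) = 0
    · rw [if_pos h0, if_pos ⟨by exact_mod_cast hm, by rw [h0]; rfl⟩]
      norm_num
    · rw [if_neg h0, if_neg (by rintro ⟨-, hc⟩; exact h0 (by exact_mod_cast hc))]
  · -- total ≤ 0: the loop does not run, total ≠ 1, and B's guard is false
    rw [mersenneLoop, dif_neg (by rintro ⟨hc, -⟩; exact hp hc)]
    rw [if_neg (by simp; omega), if_neg (by rintro ⟨hc, -⟩; exact hp hc)]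

-- ===== VERDICT (by name: the statement is the Claim_ definition above) =====
theorem find_mersenne_exponent_spec : Claim_equal_find_mersenne_exponent := by
  intro n _
  exact find_mersenne_exponent_eq n
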